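-- pv_equiv track=rewrite | github.com/Taoge123/OptimizedLeetcode | LeetcodeNew/python/LC_1577.py | helper
-- ===== SOURCE A (Python) =====
-- import collections
--
-- def helper(nums1, nums2):
--     set1 = [num ** 2 for num in nums1]
--     set2 = []
--     for i in range(len(nums2)):
--         for j in range(i + 1, len(nums2)):
--             set2.append(nums2[i] * nums2[j])
--
--     count = collections.Counter(set2)
--     res = 0
--     for num in set1:
--         res += count[num]
--     return res
-- ===== SOURCE B (Python) =====
-- import collections
--
-- def helper(nums1, nums2):
--     count = collections.Counter(n * n for n in nums1)
--     res = 0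
--     for i, x in enumerate(nums2):
--         for y in nums2[i + 1:]:
--             res += count[x * y]
--     return res
-- ===== Notes on version B (the rewrite author's own statement) =====
-- stated objective: simpler
-- what changed: B counts nums1 squares once instead of materializing the O(n^2) list of nums2 pair products, and walks the pairs by value (enumerate + tail slice) accumulating Counter lookups directly, collapsing A's three phases (build product list / Counter of products / final scan over squares) into two with the Counter keyed on squares instead of products.
import Mathlib
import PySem

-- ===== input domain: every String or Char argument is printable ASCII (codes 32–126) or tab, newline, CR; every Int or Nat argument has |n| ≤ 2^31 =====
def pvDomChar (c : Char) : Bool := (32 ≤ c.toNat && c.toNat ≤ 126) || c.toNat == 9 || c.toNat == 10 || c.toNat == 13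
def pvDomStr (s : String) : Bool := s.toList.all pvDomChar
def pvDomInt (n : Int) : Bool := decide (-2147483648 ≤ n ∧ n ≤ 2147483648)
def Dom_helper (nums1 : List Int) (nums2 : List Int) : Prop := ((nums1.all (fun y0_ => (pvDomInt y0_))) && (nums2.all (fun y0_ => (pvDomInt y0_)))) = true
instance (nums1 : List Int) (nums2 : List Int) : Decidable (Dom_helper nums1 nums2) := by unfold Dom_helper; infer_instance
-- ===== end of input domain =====

-- B avoids materializing the list of nums2 pair products: it counts nums1 squares once
-- and accumulates lookups while walking the pairs by value (objective: simpler).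

-- ===== PORT A =====
def helper (nums1 : List Int) (nums2 : List Int) : Int :=
  let set1 := nums1.map (fun num => num ^ 2)
  let set2 := (PySem.List.pyRange 0 (PySem.List.len nums2) 1).foldl (fun acc i =>
      (PySem.List.pyRange (i + 1) (PySem.List.len nums2) 1).foldl (fun acc2 j =>
        acc2 ++ [PySem.List.pyGetD nums2 i 0 * PySem.List.pyGetD nums2 j 0]) acc) []
  let count := PySem.Dict.counter set2
  set1.foldl (fun res num => res + count.getD num 0) 0

-- ===== PORT B =====
def helper_alt (nums1 : List Int) (nums2 : List Int) : Int :=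
  let count := PySem.Dict.counter (nums1.map (fun n => n * n))
  (PySem.List.enumerate nums2 0).foldl (fun res ix =>
    (PySem.List.slice nums2 (some (ix.1 + 1)) none).foldl (fun res2 y =>
      res2 + count.getD (ix.2 * y) 0) res) 0

-- ===== PRECONDITION & SPEC =====
def Spec_helper (nums1 : List Int) (nums2 : List Int) (out : Int) : Prop := out = helper_alt nums1 nums2
instance (nums1 : List Int) (nums2 : List Int) (out : Int) : Decidable (Spec_helper nums1 nums2 out) := by unfold Spec_helper; infer_instance

-- ===== CLAIM (what is proved, stated in full; the proofs are below) =====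
def Claim_equal_helper : Prop := ∀ (nums1 : List Int) (nums2 : List Int), Dom_helper nums1 nums2 → Spec_helper nums1 nums2 (helper nums1 nums2)

-- ===== LEMMAS AND PROOFS =====

-- the list of products nums2[i]*nums2[j] over pairs i < j, in A's traversal order
def pvPairs (nums2 : List Int) : List Int :=
  (PySem.List.pyRange 0 (PySem.List.len nums2) 1).flatMap (fun i =>
    (PySem.List.pyRange (i + 1) (PySem.List.len nums2) 1).map (fun j =>
      PySem.List.pyGetD nums2 i 0 * PySem.List.pyGetD nums2 j 0))

-- common normal form: for each index k, sum the square-counts of nums2[k] * y over the tail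
def pvSum (nums1 nums2 : List Int) : Int :=
  ((List.range nums2.length).map (fun k =>
    ((nums2.drop (k + 1)).map (fun y =>
      (((nums1.map (fun n => n * n)).count (PySem.List.pyGetD nums2 (k : Int) 0 * y)) : Int))).sum)).sum

-- double counting: summing ys-counts over xs equals summing xs-counts over ys
theorem pv_cross_count (xs ys : List Int) :
    (xs.map (fun x => (ys.count x : Int))).sum = (ys.map (fun y => (xs.count y : Int))).sum := by
  induction xs with
  | nil => simp
  | cons a t ih =>
    simp only [List.map_cons, List.sum_cons, ih, List.count_cons]
    push_cast
    rw [PySem.List.sum_map_add_int]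
    have h2 : (ys.map (fun y => if (a == y) = true then (1 : Int) else 0)).sum = (ys.count a : Int) := by
      rw [PySem.List.sum_map_ite_one_zero, List.count_eq_countP]
      congr 1
      apply List.countP_congr
      intro y _
      simp [BEq.comm]
    rw [h2]
    ring

theorem pv_helper_eq (nums1 nums2 : List Int) :
    helper nums1 nums2 = ((nums1.map (fun n => n ^ 2)).map (fun s => ((pvPairs nums2).count s : Int))).sum := by
  unfold helper pvPairs
  dsimp only
  have hinner : (fun (acc : List Int) (i : Int) =>
        (PySem.List.pyRange (i + 1) (PySem.List.len nums2) 1).foldl (fun acc2 j =>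
          acc2 ++ [PySem.List.pyGetD nums2 i 0 * PySem.List.pyGetD nums2 j 0]) acc)
      = (fun (acc : List Int) (i : Int) => acc ++ (PySem.List.pyRange (i + 1) (PySem.List.len nums2) 1).map
          (fun j => PySem.List.pyGetD nums2 i 0 * PySem.List.pyGetD nums2 j 0)) := by
    funext acc i; rw [PySem.List.foldl_append_singleton_eq_map]
  rw [hinner, PySem.List.foldl_append_eq_flatMap, List.nil_append]
  have hc : (fun (res : Int) (num : Int) => res + (PySem.Dict.counter
        ((PySem.List.pyRange 0 (PySem.List.len nums2) 1).flatMap (fun i =>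
          (PySem.List.pyRange (i + 1) (PySem.List.len nums2) 1).map
            (fun j => PySem.List.pyGetD nums2 i 0 * PySem.List.pyGetD nums2 j 0)))).getD num 0)
      = (fun (res : Int) (num : Int) => res + (((PySem.List.pyRange 0 (PySem.List.len nums2) 1).flatMap (fun i =>
          (PySem.List.pyRange (i + 1) (PySem.List.len nums2) 1).map
            (fun j => PySem.List.pyGetD nums2 i 0 * PySem.List.pyGetD nums2 j 0))).count num : Int)) := by
    funext res num; rw [PySem.Dict.getD_counter]
  rw [hc, PySem.List.foldl_add, zero_add]

theorem pv_pairs_sum (nums1 nums2 : List Int) :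
    ((pvPairs nums2).map (fun p => (((nums1.map (fun n => n * n)).count p) : Int))).sum
      = pvSum nums1 nums2 := by
  unfold pvPairs pvSum
  rw [List.map_flatMap, List.flatMap_def, List.sum_flatten, List.map_map]
  simp only [PySem.List.len_eq]
  rw [PySem.List.pyRange_zero_nat, List.map_map]
  apply congrArg List.sum
  apply List.map_congr_left
  intro k _
  simp only [Function.comp]
  have hmm : ((fun p => (((nums1.map (fun n => n * n)).count p) : Int)) ∘ (fun j => PySem.List.pyGetD nums2 (k : Int) 0 * PySem.List.pyGetD nums2 j 0))
      = (fun y => (((nums1.map (fun n => n * n)).count (PySem.List.pyGetD nums2 (k : Int) 0 * y)) : Int)) ∘ (fun j => PySem.List.pyGetD nums2 j 0) := rfl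
  rw [List.map_map, hmm, ← List.map_map]
  rw [PySem.List.map_pyGetD_pyRange' nums2 0 (by positivity)]
  have ht : ((k : Int) + 1).toNat = k + 1 := by omega
  rw [ht]

theorem pv_alt_eq (nums1 nums2 : List Int) :
    helper_alt nums1 nums2 = pvSum nums1 nums2 := by
  unfold helper_alt pvSum
  dsimp only
  rw [PySem.List.enumerate_eq_map_pyRange nums2 0, List.foldl_map]
  have hinner : (fun (res : Int) (j : Int) =>
        (PySem.List.slice nums2 (some ((j, PySem.List.pyGetD nums2 j 0).1 + 1)) none).foldl
          (fun res2 y => res2 + (PySem.Dict.counter (nums1.map (fun n => n * n))).getD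
            ((j, PySem.List.pyGetD nums2 j 0).2 * y) 0) res)
      = (fun (res : Int) (j : Int) => res +
          ((PySem.List.slice nums2 (some (j + 1)) none).map
            (fun y => (((nums1.map (fun n => n * n)).count (PySem.List.pyGetD nums2 j 0 * y)) : Int))).sum) := by
    funext res j
    simp only []
    have hcd : (fun (res2 : Int) (y : Int) => res2 + (PySem.Dict.counter (nums1.map (fun n => n * n))).getD
          (PySem.List.pyGetD nums2 j 0 * y) 0)
        = (fun (res2 : Int) (y : Int) => res2 + (((nums1.map (fun n => n * n)).count (PySem.List.pyGetD nums2 j 0 * y)) : Int)) := by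
      funext res2 y; rw [PySem.Dict.getD_counter]
    rw [hcd, PySem.List.foldl_add]
  rw [hinner, PySem.List.foldl_add, zero_add]
  simp only [PySem.List.len_eq]
  rw [PySem.List.pyRange_zero_nat, List.map_map]
  apply congrArg List.sum
  apply List.map_congr_left
  intro k _
  simp only [Function.comp]
  have : ((k : Int) + 1) = ((k + 1 : Nat) : Int) := by push_cast; ring
  rw [this, PySem.List.slice_from_natCast]

-- ===== VERDICT (by name: the statement is the Claim_ definition above) =====
theorem helper_spec : Claim_equal_helper := by
  intro nums1 nums2 _
  unfold Spec_helper
  rw [pv_helper_eq, pv_alt_eq]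
  have hsq : nums1.map (fun n => n ^ 2) = nums1.map (fun n => n * n) := by
    apply List.map_congr_left; intro n _; ring
  rw [hsq, pv_cross_count, pv_pairs_sum]
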